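-- pv_equiv track=rewrite | github.com/dpxrk/Pactwise | backend/ml-services/document-understanding/app.py | categorize_form_fields
-- ===== SOURCE A (Python) =====
-- from typing import Optional, List, Dict, Any
--
-- def categorize_form_fields(forms: List[Dict[str, Any]]) -> Dict[str, int]:
--     """Categorize extracted form fields."""
--     categories = {
--         "text": 0,
--         "date": 0,
--         "number": 0,
--         "checkbox": 0,
--         "signature": 0,
--         "other": 0
--     }
--
--     for field in forms:
--         field_type = field.get("type", "other")
--         if field_type in categories:
--             categories[field_type] += 1
--         else:
--             categories["other"] += 1
--
--     return categories
-- ===== SOURCE B (Python) =====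
-- from typing import Optional, List, Dict, Any
--
-- KNOWN = ("text", "date", "number", "checkbox", "signature")
--
-- def categorize_form_fields(forms: List[Dict[str, Any]]) -> Dict[str, int]:
--     """Categorize extracted form fields: per-category counting passes, no mutated counter dict."""
--     types = [field.get("type", "other") for field in forms]
--     result = {k: types.count(k) for k in KNOWN}
--     result["other"] = sum(1 for t in types if t not in KNOWN)
--     return result
-- ===== Notes on version B (the rewrite author's own statement) =====
-- stated objective: alternative
-- what changed: A mutates a six-key counter dict with unit increments while branching per field; B extracts the type list once and builds the result declaratively, counting each known category with list.count and computing 'other' as the count of types outside the known set -- no dict mutation or membership branch per field.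
import Mathlib
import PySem

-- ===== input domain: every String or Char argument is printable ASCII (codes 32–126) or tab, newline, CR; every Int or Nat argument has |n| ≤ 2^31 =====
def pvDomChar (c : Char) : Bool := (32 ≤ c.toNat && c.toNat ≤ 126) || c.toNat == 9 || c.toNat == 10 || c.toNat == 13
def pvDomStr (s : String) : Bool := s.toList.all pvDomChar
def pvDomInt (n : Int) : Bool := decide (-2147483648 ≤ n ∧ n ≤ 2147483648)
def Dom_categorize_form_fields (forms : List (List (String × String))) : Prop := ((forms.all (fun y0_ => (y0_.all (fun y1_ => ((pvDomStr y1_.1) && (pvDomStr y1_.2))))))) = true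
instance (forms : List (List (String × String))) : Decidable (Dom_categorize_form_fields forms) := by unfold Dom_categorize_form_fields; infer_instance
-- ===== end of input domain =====

-- B replaces A's mutated six-key counter dict (one branch + unit increment per field) by a
-- declarative build: extract the type list once, count each known category with list.count,
-- and compute "other" as the number of types outside the known set. Same cost, alternative structure.

-- ===== PORT A =====
-- field.get("type", "other"): first-match lookup in the field's association list (Python dict).
def categorize_form_fields (forms : List (List (String × String))) : List (String × Int) :=
  let categories : PySem.Dict String Int :=
    PySem.Dict.ofList [("text", 0), ("date", 0), ("number", 0), ("checkbox", 0), ("signature", 0), ("other", 0)]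
  let categories := forms.foldl (fun cats field =>
    let field_type := (PySem.Dict.mk field).getD "type" "other"
    if cats.contains field_type then cats.modify field_type 0 (· + 1)
    else cats.modify "other" 0 (· + 1)) categories
  categories.items

-- ===== PORT B =====
-- module constant KNOWN from Source B
def pvKNOWN : List String := ["text", "date", "number", "checkbox", "signature"]

def categorize_form_fields_alt (forms : List (List (String × String))) : List (String × Int) :=
  let types := forms.map (fun field => (PySem.Dict.mk field).getD "type" "other")
  -- {k: types.count(k) for k in KNOWN}
  let result := pvKNOWN.map (fun k => (k, (PySem.List.count types k : Int)))
  -- result["other"] = sum(1 for t in types if t not in KNOWN)  (a 0/1-sum is countP)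
  result ++ [("other", ((types.countP (fun t => !pvKNOWN.contains t) : Nat) : Int))]

-- ===== PRECONDITION & SPEC =====
def Spec_categorize_form_fields (forms : List (List (String × String))) (out : List (String × Int)) : Prop := out = categorize_form_fields_alt forms
instance (forms : List (List (String × String))) (out : List (String × Int)) : Decidable (Spec_categorize_form_fields forms out) := by unfold Spec_categorize_form_fields; infer_instance

-- ===== CLAIM (what is proved, stated in full; the proofs are below) =====
def Claim_equal_categorize_form_fields : Prop := ∀ (forms : List (List (String × String))), Dom_categorize_form_fields forms → Spec_categorize_form_fields forms (categorize_form_fields forms)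

-- ===== LEMMAS AND PROOFS =====

def pvSix : List String := ["text", "date", "number", "checkbox", "signature", "other"]

def pvInit : PySem.Dict String Int :=
  PySem.Dict.ofList [("text", 0), ("date", 0), ("number", 0), ("checkbox", 0), ("signature", 0), ("other", 0)]

def pvBucket (t : String) : String := if t ∈ pvSix then t else "other"

def pvFieldT (field : List (String × String)) : String := (PySem.Dict.mk field).getD "type" "other"

lemma pvBucket_mem (t : String) : pvBucket t ∈ pvSix := by
  unfold pvBucket; split_ifs with h
  · exact h
  · simp [pvSix]

lemma pvInit_keys : pvInit.keys = pvSix := by decide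

lemma pvKeys_modify (d : PySem.Dict String Int) (k : String) (f : Int → Int)
    (hd : d.keys = pvSix) (hk : k ∈ pvSix) : (d.modify k 0 f).keys = pvSix := by
  rw [PySem.Dict.keys_modify, PySem.Dict.keys_insert_of_contains, hd]
  rw [PySem.Dict.contains_eq_decide_mem_keys, hd]
  simpa using hk

-- A's contains-branching step is the bucketed unit increment while the keys are the six categories
lemma pvFoldA_eq (xs : List (List (String × String))) : ∀ d : PySem.Dict String Int, d.keys = pvSix →
    xs.foldl (fun cats field =>
      if cats.contains (pvFieldT field) then cats.modify (pvFieldT field) 0 (· + 1)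
      else cats.modify "other" 0 (· + 1)) d
    = xs.foldl (fun cats field => cats.modify (pvBucket (pvFieldT field)) 0 (· + 1)) d := by
  induction xs with
  | nil => intro d _; rfl
  | cons x t ih =>
    intro d hd
    have hstep : (if d.contains (pvFieldT x) then d.modify (pvFieldT x) 0 (· + 1)
        else d.modify "other" 0 (· + 1)) = d.modify (pvBucket (pvFieldT x)) 0 (· + 1) := by
      rw [PySem.Dict.contains_eq_decide_mem_keys, hd]
      unfold pvBucket
      by_cases h : pvFieldT x ∈ pvSix <;> simp [h]
    simp only [List.foldl_cons, hstep]
    exact ih _ (pvKeys_modify d _ _ hd (pvBucket_mem _))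

lemma pvKeysA (xs : List (List (String × String))) : ∀ d : PySem.Dict String Int, d.keys = pvSix →
    (xs.foldl (fun cats field => cats.modify (pvBucket (pvFieldT field)) 0 (· + 1)) d).keys = pvSix := by
  induction xs with
  | nil => intro d hd; exact hd
  | cons x t ih =>
    intro d hd
    simp only [List.foldl_cons]
    exact ih _ (pvKeys_modify d _ _ hd (pvBucket_mem _))

lemma pvKnown_sub_six (k : String) (hk : k ∈ pvKNOWN) : k ∈ pvSix := by
  simp only [pvKNOWN, List.mem_cons, List.not_mem_nil, or_false] at hk
  rcases hk with rfl | rfl | rfl | rfl | rfl <;> simp [pvSix]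

-- for a known category k, a field lands in bucket k exactly when its type is k
lemma pvBucket_eq_known (t k : String) (hk : k ∈ pvKNOWN) : (pvBucket t == k) = (t == k) := by
  unfold pvBucket; split_ifs with h
  · rfl
  · have h1 : k ≠ "other" := by
      intro e; subst e
      simp [pvKNOWN] at hk
    have h2 : t ≠ k := fun e => h (e ▸ pvKnown_sub_six k hk)
    simp [Ne.symm h1, h2]

-- a field lands in bucket "other" exactly when its type is not a known category
lemma pvBucket_eq_other (t : String) : (pvBucket t == "other") = !pvKNOWN.contains t := by
  unfold pvBucket; split_ifs with h
  · simp only [pvSix, List.mem_cons, List.not_mem_nil, or_false] at h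
    rcases h with rfl | rfl | rfl | rfl | rfl | rfl <;> decide
  · have : ¬ t ∈ pvKNOWN := fun ht => h (pvKnown_sub_six t ht)
    simp [this]

-- getD over the bucketed fold = count of fields routed to that key (pvInit holds 0 at every six key)
lemma pvGetD_count (forms : List (List (String × String))) (v : String) :
    (forms.foldl (fun cats field => cats.modify (pvBucket (pvFieldT field)) 0 (· + 1)) pvInit).getD v 0
    = pvInit.getD v 0 + (forms.countP (fun field => pvBucket (pvFieldT field) == v) : Int) := by
  have hA := PySem.Dict.getD_foldl_modify_add_one
      (forms.map (fun field => pvBucket (pvFieldT field))) pvInit v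
  rw [List.foldl_map, List.count_eq_countP, List.countP_map] at hA
  simpa [Function.comp_def] using hA

theorem categorize_form_fields_spec : Claim_equal_categorize_form_fields := by
  intro forms _
  unfold Spec_categorize_form_fields categorize_form_fields categorize_form_fields_alt
  show (forms.foldl (fun cats field =>
        if cats.contains (pvFieldT field) then cats.modify (pvFieldT field) 0 (· + 1)
        else cats.modify "other" 0 (· + 1)) pvInit).items
    = pvKNOWN.map (fun k => (k, (PySem.List.count (forms.map pvFieldT) k : Int)))
      ++ [("other", (((forms.map pvFieldT).countP (fun t => !pvKNOWN.contains t) : Nat) : Int))]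
  rw [pvFoldA_eq forms pvInit pvInit_keys]
  have hKA := pvKeysA forms pvInit pvInit_keys
  have hnodup : pvSix.Nodup := by decide
  rw [PySem.Dict.items_eq_map_keys _ (by rw [hKA]; exact hnodup) 0, hKA]
  have hsix : pvSix = pvKNOWN ++ ["other"] := rfl
  rw [hsix, List.map_append]
  congr 1
  · apply List.map_congr_left
    intro k hk
    refine congrArg (Prod.mk k) ?_
    rw [pvGetD_count]
    have h0 : pvInit.getD k 0 = 0 := by
      have := pvKnown_sub_six k hk
      simp only [pvSix, List.mem_cons, List.not_mem_nil, or_false] at this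
      rcases this with rfl | rfl | rfl | rfl | rfl | rfl <;> decide
    rw [h0, PySem.List.count_eq, List.count_eq_countP, List.countP_map]
    rw [List.countP_congr (fun f _ => by rw [pvBucket_eq_known (pvFieldT f) k hk])]
    simp [Function.comp_def]
  · simp only [List.map_cons, List.map_nil, List.cons.injEq, and_true]
    refine congrArg (Prod.mk "other") ?_
    rw [pvGetD_count]
    have h0 : pvInit.getD "other" 0 = 0 := by decide
    rw [h0, List.countP_map]
    rw [List.countP_congr (fun f _ => by rw [pvBucket_eq_other (pvFieldT f)])]
    simp [Function.comp_def]
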